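-- pv_equiv track=rewrite | github.com/adryanmoran/FinalWeb | Metodos para VARK y Jung/app.py | obtener_modo_vark
-- ===== SOURCE A (Python) =====
-- tabla = [
--     {"#": 1, "V": "b", "A": "a", "R": "c", "K": "d"},
--     {"#": 2, "V": "b", "A": "a", "R": "a", "K": "b"},
--     {"#": 3, "V": "c", "A": "d", "R": "c", "K": "a"},
--     {"#": 4, "V": "c", "A": "a", "R": "b", "K": "a"},
--     {"#": 5, "V": "d", "A": "c", "R": "b", "K": "a"},
--     {"#": 6, "V": "b", "A": "d", "R": "c", "K": "a"},
--     {"#": 7, "V": "d", "A": "b", "R": "c", "K": "c"},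
--     {"#": 8, "V": "d", "A": "d", "R": "a", "K": "c"},
--     {"#": 9, "V": "a", "A": "b", "R": "d", "K": "c"},
--     {"#": 10, "V": "b", "A": "b", "R": "c", "K": "d"},
--     {"#": 11, "V": "d", "A": "c", "R": "b", "K": "a"},
--     {"#": 12, "V": "c", "A": "a", "R": "b", "K": "d"},
--     {"#": 13, "V": "d", "A": "c", "R": "b", "K": "a"},
--     {"#": 14, "V": "c", "A": "d", "R": "b", "K": "a"},
--     {"#": 15, "V": "d", "A": "c", "R": "a", "K": "b"},
--     {"#": 16, "V": "d", "A": "c", "R": "a", "K": "b"}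
-- ]
--
-- def obtener_modo_vark(id_pregunta, respuesta):
--     for fila in tabla:
--         if fila["#"] == id_pregunta:
--             if respuesta == fila["V"]:
--                 return "V"
--             elif respuesta == fila["A"]:
--                 return "A"
--             elif respuesta == fila["R"]:
--                 return "R"
--             elif respuesta == fila["K"]:
--                 return "K"
--     return None
-- ===== SOURCE B (Python) =====
-- # Flat decision table: the V>A>R>K priority of the original if/elif chain is
-- # already resolved in the literal below, so a call is one dict lookup.
-- _MODO = {
--     (1, "b"): "V", (1, "a"): "A", (1, "c"): "R", (1, "d"): "K",
--     (2, "b"): "V", (2, "a"): "A",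
--     (3, "c"): "V", (3, "d"): "A", (3, "a"): "K",
--     (4, "c"): "V", (4, "a"): "A", (4, "b"): "R",
--     (5, "d"): "V", (5, "c"): "A", (5, "b"): "R", (5, "a"): "K",
--     (6, "b"): "V", (6, "d"): "A", (6, "c"): "R", (6, "a"): "K",
--     (7, "d"): "V", (7, "b"): "A", (7, "c"): "R",
--     (8, "d"): "V", (8, "a"): "R", (8, "c"): "K",
--     (9, "a"): "V", (9, "b"): "A", (9, "d"): "R", (9, "c"): "K",
--     (10, "b"): "V", (10, "c"): "R", (10, "d"): "K",
--     (11, "d"): "V", (11, "c"): "A", (11, "b"): "R", (11, "a"): "K",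
--     (12, "c"): "V", (12, "a"): "A", (12, "b"): "R", (12, "d"): "K",
--     (13, "d"): "V", (13, "c"): "A", (13, "b"): "R", (13, "a"): "K",
--     (14, "c"): "V", (14, "d"): "A", (14, "b"): "R", (14, "a"): "K",
--     (15, "d"): "V", (15, "c"): "A", (15, "a"): "R", (15, "b"): "K",
--     (16, "d"): "V", (16, "c"): "A", (16, "a"): "R", (16, "b"): "K",
-- }
--
-- def obtener_modo_vark(id_pregunta, respuesta):
--     return _MODO.get((id_pregunta, respuesta))
-- ===== Notes on version B (the rewrite author's own statement) =====
-- stated objective: simpler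
-- what changed: Replaces the per-call linear scan of the row table and its four-way V/A/R/K if/elif priority chain by one flat module-level dict literal keyed by (question, answer) pairs with the priority already resolved in the data, so a call is a single dict lookup with no control flow.
import Mathlib
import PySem

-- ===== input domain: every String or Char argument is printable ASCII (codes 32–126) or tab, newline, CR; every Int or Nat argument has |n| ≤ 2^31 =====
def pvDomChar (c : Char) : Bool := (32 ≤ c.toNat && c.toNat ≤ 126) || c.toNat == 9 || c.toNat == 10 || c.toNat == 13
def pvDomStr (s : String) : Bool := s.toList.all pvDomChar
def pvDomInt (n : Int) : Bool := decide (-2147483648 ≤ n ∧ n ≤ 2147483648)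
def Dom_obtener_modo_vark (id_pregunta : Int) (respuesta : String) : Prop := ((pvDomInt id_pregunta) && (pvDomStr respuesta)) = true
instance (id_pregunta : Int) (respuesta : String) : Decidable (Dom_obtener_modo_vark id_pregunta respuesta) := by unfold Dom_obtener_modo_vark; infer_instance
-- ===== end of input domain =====

-- B replaces A's per-call linear table scan with its V/A/R/K if/elif priority chain by one flat
-- literal dict keyed by (question, answer) pairs, the priority already resolved in the literal.

-- ===== PORT A =====
-- each table row as (#, V, A, R, K)
def tabla : List (Int × String × String × String × String) :=
  [ (1, "b", "a", "c", "d"), (2, "b", "a", "a", "b"), (3, "c", "d", "c", "a"),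
    (4, "c", "a", "b", "a"), (5, "d", "c", "b", "a"), (6, "b", "d", "c", "a"),
    (7, "d", "b", "c", "c"), (8, "d", "d", "a", "c"), (9, "a", "b", "d", "c"),
    (10, "b", "b", "c", "d"), (11, "d", "c", "b", "a"), (12, "c", "a", "b", "d"),
    (13, "d", "c", "b", "a"), (14, "c", "d", "b", "a"), (15, "d", "c", "a", "b"),
    (16, "d", "c", "a", "b") ]

-- the for-loop of A: scan the rows in order; on an id match run the if/elif chain,
-- falling through to the rest of the loop when no letter matches (exactly as in Python)
def scanA : List (Int × String × String × String × String) → Int → String → Option String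
  | [], _, _ => none
  | (n, v, a, r, k) :: rest, id_pregunta, respuesta =>
      if n = id_pregunta then
        if respuesta = v then some "V"
        else if respuesta = a then some "A"
        else if respuesta = r then some "R"
        else if respuesta = k then some "K"
        else scanA rest id_pregunta respuesta
      else scanA rest id_pregunta respuesta

def obtener_modo_vark (id_pregunta : Int) (respuesta : String) : Option String :=
  scanA tabla id_pregunta respuesta

-- ===== PORT B =====
-- the module-level dict literal _MODO (distinct keys, insertion order as written)
def modoB : PySem.Dict (Int × String) String := PySem.Dict.mk
  [ ((1, "b"), "V"), ((1, "a"), "A"), ((1, "c"), "R"), ((1, "d"), "K"),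
    ((2, "b"), "V"), ((2, "a"), "A"),
    ((3, "c"), "V"), ((3, "d"), "A"), ((3, "a"), "K"),
    ((4, "c"), "V"), ((4, "a"), "A"), ((4, "b"), "R"),
    ((5, "d"), "V"), ((5, "c"), "A"), ((5, "b"), "R"), ((5, "a"), "K"),
    ((6, "b"), "V"), ((6, "d"), "A"), ((6, "c"), "R"), ((6, "a"), "K"),
    ((7, "d"), "V"), ((7, "b"), "A"), ((7, "c"), "R"),
    ((8, "d"), "V"), ((8, "a"), "R"), ((8, "c"), "K"),
    ((9, "a"), "V"), ((9, "b"), "A"), ((9, "d"), "R"), ((9, "c"), "K"),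
    ((10, "b"), "V"), ((10, "c"), "R"), ((10, "d"), "K"),
    ((11, "d"), "V"), ((11, "c"), "A"), ((11, "b"), "R"), ((11, "a"), "K"),
    ((12, "c"), "V"), ((12, "a"), "A"), ((12, "b"), "R"), ((12, "d"), "K"),
    ((13, "d"), "V"), ((13, "c"), "A"), ((13, "b"), "R"), ((13, "a"), "K"),
    ((14, "c"), "V"), ((14, "d"), "A"), ((14, "b"), "R"), ((14, "a"), "K"),
    ((15, "d"), "V"), ((15, "c"), "A"), ((15, "a"), "R"), ((15, "b"), "K"),
    ((16, "d"), "V"), ((16, "c"), "A"), ((16, "a"), "R"), ((16, "b"), "K") ]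

-- _MODO.get((id_pregunta, respuesta))
def obtener_modo_vark_alt (id_pregunta : Int) (respuesta : String) : Option String :=
  modoB.get? (id_pregunta, respuesta)

-- ===== PRECONDITION & SPEC =====
def Spec_obtener_modo_vark (id_pregunta : Int) (respuesta : String) (out : Option String) : Prop := out = obtener_modo_vark_alt id_pregunta respuesta
instance (id_pregunta : Int) (respuesta : String) (out : Option String) : Decidable (Spec_obtener_modo_vark id_pregunta respuesta out) := by unfold Spec_obtener_modo_vark; infer_instance

-- ===== CLAIM =====
def Claim_equal_obtener_modo_vark : Prop := ∀ (id_pregunta : Int) (respuesta : String), Dom_obtener_modo_vark id_pregunta respuesta → Spec_obtener_modo_vark id_pregunta respuesta (obtener_modo_vark id_pregunta respuesta)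

-- ===== LEMMAS AND PROOFS =====

-- A's scan returns None when no row carries the requested id
theorem scanA_eq_none_of_id (rows : List (Int × String × String × String × String))
    (id_pregunta : Int) (respuesta : String)
    (h : ∀ row ∈ rows, row.1 ≠ id_pregunta) :
    scanA rows id_pregunta respuesta = none := by
  induction rows with
  | nil => rfl
  | cons row rest ih =>
      obtain ⟨n, v, a, r, k⟩ := row
      have hn : n ≠ id_pregunta := h _ List.mem_cons_self
      simp only [scanA, if_neg hn]
      exact ih (fun row hr => h row (List.mem_cons_of_mem _ hr))

-- A's scan returns None when the answer matches no letter of any row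
theorem scanA_eq_none_of_resp (rows : List (Int × String × String × String × String))
    (id_pregunta : Int) (respuesta : String)
    (h : ∀ row ∈ rows, respuesta ≠ row.2.1 ∧ respuesta ≠ row.2.2.1 ∧
          respuesta ≠ row.2.2.2.1 ∧ respuesta ≠ row.2.2.2.2) :
    scanA rows id_pregunta respuesta = none := by
  induction rows with
  | nil => rfl
  | cons row rest ih =>
      obtain ⟨n, v, a, r, k⟩ := row
      obtain ⟨h1, h2, h3, h4⟩ := h _ List.mem_cons_self
      have ih' := ih (fun row hr => h row (List.mem_cons_of_mem _ hr))
      by_cases hn : n = id_pregunta <;>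
        simp [scanA, hn, if_neg h1, if_neg h2, if_neg h3, if_neg h4, ih']

-- B's dict has only question numbers 1..16 as first key components
theorem modoB_none_of_id (id_pregunta : Int) (respuesta : String)
    (h : ¬ (1 ≤ id_pregunta ∧ id_pregunta ≤ 16)) :
    modoB.get? (id_pregunta, respuesta) = none := by
  rw [PySem.Dict.get?_eq_none_iff_not_mem_keys]
  intro hmem
  have hfst := List.mem_map_of_mem (f := Prod.fst) hmem
  simp [modoB, PySem.Dict.keys] at hfst
  omega

-- B's dict has only "a".."d" as second key components
theorem modoB_none_of_resp (id_pregunta : Int) (respuesta : String)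
    (ha : respuesta ≠ "a") (hb : respuesta ≠ "b") (hc : respuesta ≠ "c") (hd : respuesta ≠ "d") :
    modoB.get? (id_pregunta, respuesta) = none := by
  rw [PySem.Dict.get?_eq_none_iff_not_mem_keys]
  intro hmem
  have hsnd := List.mem_map_of_mem (f := Prod.snd) hmem
  simp [modoB, PySem.Dict.keys, ha, hb, hc, hd] at hsnd

-- ===== VERDICT =====
set_option maxHeartbeats 2000000 in
theorem obtener_modo_vark_spec : Claim_equal_obtener_modo_vark := by
  intro id resp _
  unfold Spec_obtener_modo_vark obtener_modo_vark obtener_modo_vark_alt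
  by_cases hr : resp = "a" ∨ resp = "b" ∨ resp = "c" ∨ resp = "d"
  · by_cases hi : 1 ≤ id ∧ id ≤ 16
    · obtain ⟨hl, hu⟩ := hi
      interval_cases id <;> rcases hr with rfl | rfl | rfl | rfl <;> decide
    · rw [scanA_eq_none_of_id _ _ _ (by intro row hrow; fin_cases hrow <;> simp <;> omega),
          modoB_none_of_id _ _ hi]
  · push Not at hr
    obtain ⟨ha, hb, hc, hd⟩ := hr
    rw [scanA_eq_none_of_resp _ _ _ (by intro row hrow; fin_cases hrow <;> refine ⟨?_, ?_, ?_, ?_⟩ <;> first | exact ha | exact hb | exact hc | exact hd),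
        modoB_none_of_resp _ _ ha hb hc hd]
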